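-- pv_equiv track=rewrite | github.com/forxnives/FXSentimentAntiGridRobot | CompleteScript.py | LEVELDETECT
-- ===== SOURCE A (Python) =====
-- def LEVELDETECT(symbol, symboltickets, symboljson):
--
--     # declaring variables
--
--     level = 5
--     short = False
--     long = False
--     continuation = False
--     nbrtrades = len(symboltickets)
--
--     # checking continuation
--
--     for eachticket in symboltickets:
--         if symboljson[eachticket]['_comment'] == str(symbol + 'SHORT1') or symboljson[eachticket]['_comment'] == str(symbol + 'SHORT2') or symboljson[eachticket]['_comment'] == str(symbol + 'SHORT3'):
--             short = True
--         # if symboljson[eachticket]['_comment'] == str(symbol + 'LONG1') or str(symbol + 'LONG2'):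
--         if symboljson[eachticket]['_comment'] == str(symbol + 'LONG1') or symboljson[eachticket]['_comment'] == str(symbol + 'LONG2') or symboljson[eachticket]['_comment'] == str(symbol + 'LONG3'):
--             long = True
--
--     if short and long is True:
--         continuation = True
--
--     # doing level logic
--
--     if nbrtrades == 0:
--         level = 0
--
--     elif nbrtrades > 0:
--         if continuation is False:
--             level = 2
--             for eachticket in symboltickets:
--                 if symboljson[eachticket]['_comment'] == str(symbol + 'SHORT1') or symboljson[eachticket]['_comment'] == str(symbol + 'LONG1'):
--                     level = 1
--         else:
--             level = 3
--             for eachticket in symboltickets: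
--                 if symboljson[eachticket]['_comment'] == str(symbol + 'SHORT3') or symboljson[eachticket]['_comment'] == str(symbol + 'LONG3'):
--                     level = 4
--     return level
-- ===== SOURCE B (Python) =====
-- def LEVELDETECT(symbol, symboltickets, symboljson):
--     # One pass accumulating a 6-bit mask of which tag comments occur; decide by bit tests.
--     tags = {symbol + 'SHORT1': 1, symbol + 'SHORT2': 2, symbol + 'SHORT3': 4,
--             symbol + 'LONG1': 8, symbol + 'LONG2': 16, symbol + 'LONG3': 32}
--     mask = 0
--     for t in symboltickets:
--         mask |= tags.get(symboljson[t]['_comment'], 0)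
--     if not symboltickets:
--         return 0
--     if mask & 0b000111 and mask & 0b111000:      # both a short and a long tag seen
--         return 4 if mask & 0b100100 else 3       # a level-3 trade exists
--     return 1 if mask & 0b001001 else 2           # a level-1 trade exists
-- ===== Notes on version B (the rewrite author's own statement) =====
-- stated objective: alternative
-- what changed: Replaces A's three equality-scanning loops and three Boolean flags by a single pass that ORs a 6-bit tag bitmask per ticket (tag bit looked up in a dict built once) and then decides the level with straight-line bit tests on the mask.
import Mathlib
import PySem

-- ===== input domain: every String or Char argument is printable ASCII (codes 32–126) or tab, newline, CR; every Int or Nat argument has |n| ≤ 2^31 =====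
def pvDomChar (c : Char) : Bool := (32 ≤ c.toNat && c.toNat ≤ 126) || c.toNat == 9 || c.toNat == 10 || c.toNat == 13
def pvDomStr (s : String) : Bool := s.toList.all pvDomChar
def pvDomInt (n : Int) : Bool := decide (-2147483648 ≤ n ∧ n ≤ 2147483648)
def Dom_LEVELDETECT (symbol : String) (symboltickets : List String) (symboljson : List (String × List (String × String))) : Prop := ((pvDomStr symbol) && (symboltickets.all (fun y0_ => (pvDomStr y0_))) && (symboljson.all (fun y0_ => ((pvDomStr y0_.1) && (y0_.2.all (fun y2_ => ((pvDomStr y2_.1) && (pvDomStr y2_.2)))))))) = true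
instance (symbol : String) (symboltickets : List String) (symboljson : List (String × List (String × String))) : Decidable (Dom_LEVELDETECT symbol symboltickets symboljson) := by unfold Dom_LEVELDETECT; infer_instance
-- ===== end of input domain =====

-- B replaces A's three equality-scanning loops and three Boolean flags by ONE pass that
-- ORs a 6-bit tag mask per ticket (tag looked up in a dict built once) and then decides
-- the level by straight-line bit tests (alternative decomposition, same cost).

-- shared by both ports: symboljson[t]['_comment'] — exact under Pre_LEVELDETECT (both keys
-- present; Python raises KeyError otherwise)
def pvComment (symboljson : List (String × List (String × String))) (t : String) : String :=
  PySem.Dict.getD (PySem.Dict.mk (PySem.Dict.getD (PySem.Dict.mk symboljson) t [])) "_comment" ""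

-- ===== PORT A =====

def LEVELDETECT (symbol : String) (symboltickets : List String) (symboljson : List (String × List (String × String))) : Int :=
  let nbrtrades : Int := symboltickets.length
  -- first loop: set short / long flags
  let sl : Bool × Bool := symboltickets.foldl (fun p t =>
      let c := pvComment symboljson t
      let shrt := if c == symbol ++ "SHORT1" || c == symbol ++ "SHORT2" || c == symbol ++ "SHORT3" then true else p.1
      let lng := if c == symbol ++ "LONG1" || c == symbol ++ "LONG2" || c == symbol ++ "LONG3" then true else p.2
      (shrt, lng)) (false, false)
  let continuation : Bool := sl.1 && sl.2
  if nbrtrades = 0 then 0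
  else if nbrtrades > 0 then
   if continuation = false then
    symboltickets.foldl (fun lv t =>
      let c := pvComment symboljson t
      if c == symbol ++ "SHORT1" || c == symbol ++ "LONG1" then 1 else lv) 2
   else
    symboltickets.foldl (fun lv t =>
      let c := pvComment symboljson t
      if c == symbol ++ "SHORT3" || c == symbol ++ "LONG3" then 4 else lv) 3
  else 5

-- ===== PORT B =====
-- the dict literal 'tags' of Source B
def pvTags (symbol : String) : PySem.Dict String Nat :=
  PySem.Dict.mk [(symbol ++ "SHORT1", 1), (symbol ++ "SHORT2", 2), (symbol ++ "SHORT3", 4),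
                 (symbol ++ "LONG1", 8), (symbol ++ "LONG2", 16), (symbol ++ "LONG3", 32)]

def LEVELDETECT_alt (symbol : String) (symboltickets : List String) (symboljson : List (String × List (String × String))) : Int :=
  let tags := pvTags symbol
  -- one pass: OR together the tag bit of each ticket's comment (0 if not a tag)
  let mask : Nat := symboltickets.foldl
      (fun m t => m ||| PySem.Dict.getD tags (pvComment symboljson t) 0) 0
  if symboltickets = [] then 0
  else if (mask &&& 7 != 0) && (mask &&& 56 != 0) then    -- both a short and a long tag seen
    if mask &&& 36 != 0 then 4 else 3                     -- a level-3 trade exists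
  else
    if mask &&& 9 != 0 then 1 else 2                      -- a level-1 trade exists

-- ===== PRECONDITION & SPEC =====
-- Pre_ excludes exactly the inputs where Python A raises KeyError (a ticket missing from
-- symboljson, or its dict lacking '_comment').
def Pre_LEVELDETECT (symbol : String) (symboltickets : List String) (symboljson : List (String × List (String × String))) : Prop :=
  ∀ t ∈ symboltickets, (((PySem.Dict.mk symboljson).get? t).bind (fun d => (PySem.Dict.mk d).get? "_comment")).isSome = true
instance (symbol : String) (symboltickets : List String) (symboljson : List (String × List (String × String))) : Decidable (Pre_LEVELDETECT symbol symboltickets symboljson) := by unfold Pre_LEVELDETECT; infer_instance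

def pvWitness_LEVELDETECT : String × List String × (List (String × List (String × String))) :=
  ("EU", ["t1", "t2"], [("t1", [("_comment", "EUSHORT1")]), ("t2", [("_comment", "EULONG3")])])

def Spec_LEVELDETECT (symbol : String) (symboltickets : List String) (symboljson : List (String × List (String × String))) (out : Int) : Prop := out = LEVELDETECT_alt symbol symboltickets symboljson
instance (symbol : String) (symboltickets : List String) (symboljson : List (String × List (String × String))) (out : Int) : Decidable (Spec_LEVELDETECT symbol symboltickets symboljson out) := by unfold Spec_LEVELDETECT; infer_instance

-- ===== CLAIM (what is proved, stated in full; the proofs are below) =====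
def Claim_equal_LEVELDETECT : Prop := ∀ (symbol : String) (symboltickets : List String) (symboljson : List (String × List (String × String))), Dom_LEVELDETECT symbol symboltickets symboljson → Pre_LEVELDETECT symbol symboltickets symboljson → Spec_LEVELDETECT symbol symboltickets symboljson (LEVELDETECT symbol symboltickets symboljson)

-- ===== LEMMAS AND PROOFS =====

-- A's flag loop computes "any ticket matches"
theorem pvFlagFold (ps pl : String → Bool) (ticks : List String) (a b : Bool) :
    ticks.foldl (fun (p : Bool × Bool) t =>
      ((if ps t then true else p.1), (if pl t then true else p.2))) (a, b)
      = (a || ticks.any ps, b || ticks.any pl) := by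
  induction ticks generalizing a b with
  | nil => simp
  | cons t rest ih =>
    simp only [List.foldl_cons, List.any_cons, ih]
    by_cases h1 : ps t <;> by_cases h2 : pl t <;> simp [h1, h2]

-- A's level loop computes "if any ticket matches then v else init"
theorem pvLevelFold (p : String → Bool) (v : Int) (ticks : List String) (a : Int) :
    ticks.foldl (fun lv t => if p t then v else lv) a
      = if ticks.any p then v else a := by
  induction ticks generalizing a with
  | nil => simp
  | cons t rest ih =>
    simp only [List.foldl_cons, List.any_cons]
    by_cases h : p t <;> simp [h, ih]

-- one OR-step of B's fold, restricted to bit group m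
theorem pvOrNe (x y : Nat) : ((x ||| y) != 0) = ((x != 0) || (y != 0)) := by
  rcases Nat.eq_zero_or_pos x with h | h
  · subst h; simp
  · have hx : x ||| y ≠ 0 := by
      intro h0
      have : x ≤ x ||| y := Nat.left_le_or
      omega
    have hx' : x ≠ 0 := by omega
    have h1 : (x ||| y != 0) = true := by simpa using hx
    have h2 : (x != 0) = true := by simpa using hx'
    rw [h1, h2, Bool.true_or]

theorem pvStep (a v m : Nat) :
    ((a ||| v) &&& m != 0) = ((a &&& m != 0) || (v &&& m != 0)) := by
  rw [Nat.and_or_distrib_right, pvOrNe]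

-- B's OR-fold hits bit group m iff some ticket's tag value does
theorem pvMaskFold (f : String → Nat) (m : Nat) (ticks : List String) (a : Nat) :
    ((ticks.foldl (fun acc t => acc ||| f t) a) &&& m != 0)
      = ((a &&& m != 0) || ticks.any (fun t => f t &&& m != 0)) := by
  induction ticks generalizing a with
  | nil => simp
  | cons t rest ih =>
    simp only [List.foldl_cons, List.any_cons, ih]
    rw [pvStep, Bool.or_assoc]

-- distinct suffixes give distinct tag keys
theorem pvNeApp (s a b : String) (h : a.toList ≠ b.toList) : ¬ (s ++ a = s ++ b) := by
  intro he
  apply h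
  have h2 : s.toList ++ a.toList = s.toList ++ b.toList := by
    simpa using congrArg String.toList he
  exact List.append_cancel_left h2

-- the four decision bits of B, in terms of A's equality tests
theorem pvTag7 (s c : String) :
    (PySem.Dict.getD (pvTags s) c 0 &&& 7 != 0)
      = (c == s ++ "SHORT1" || c == s ++ "SHORT2" || c == s ++ "SHORT3") := by
  have n12 := pvNeApp s "SHORT1" "SHORT2" (by decide)
  have n13 := pvNeApp s "SHORT1" "SHORT3" (by decide)
  have n14 := pvNeApp s "SHORT1" "LONG1" (by decide)
  have n15 := pvNeApp s "SHORT1" "LONG2" (by decide)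
  have n16 := pvNeApp s "SHORT1" "LONG3" (by decide)
  have n23 := pvNeApp s "SHORT2" "SHORT3" (by decide)
  have n24 := pvNeApp s "SHORT2" "LONG1" (by decide)
  have n25 := pvNeApp s "SHORT2" "LONG2" (by decide)
  have n26 := pvNeApp s "SHORT2" "LONG3" (by decide)
  have n34 := pvNeApp s "SHORT3" "LONG1" (by decide)
  have n35 := pvNeApp s "SHORT3" "LONG2" (by decide)
  have n36 := pvNeApp s "SHORT3" "LONG3" (by decide)
  have n45 := pvNeApp s "LONG1" "LONG2" (by decide)
  have n46 := pvNeApp s "LONG1" "LONG3" (by decide)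
  have n56 := pvNeApp s "LONG2" "LONG3" (by decide)
  simp only [pvTags, PySem.Dict.getD_eq_get?_getD, PySem.Dict.get?_mk_cons, beq_iff_eq]
  by_cases e1 : s ++ "SHORT1" = c <;> by_cases e2 : s ++ "SHORT2" = c <;>
    by_cases e3 : s ++ "SHORT3" = c <;> by_cases e4 : s ++ "LONG1" = c <;>
    by_cases e5 : s ++ "LONG2" = c <;> by_cases e6 : s ++ "LONG3" = c <;>
    simp_all [PySem.Dict.get?, @eq_comm String c]

theorem pvTag56 (s c : String) :
    (PySem.Dict.getD (pvTags s) c 0 &&& 56 != 0)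
      = (c == s ++ "LONG1" || c == s ++ "LONG2" || c == s ++ "LONG3") := by
  have n12 := pvNeApp s "SHORT1" "SHORT2" (by decide)
  have n13 := pvNeApp s "SHORT1" "SHORT3" (by decide)
  have n14 := pvNeApp s "SHORT1" "LONG1" (by decide)
  have n15 := pvNeApp s "SHORT1" "LONG2" (by decide)
  have n16 := pvNeApp s "SHORT1" "LONG3" (by decide)
  have n23 := pvNeApp s "SHORT2" "SHORT3" (by decide)
  have n24 := pvNeApp s "SHORT2" "LONG1" (by decide)
  have n25 := pvNeApp s "SHORT2" "LONG2" (by decide)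
  have n26 := pvNeApp s "SHORT2" "LONG3" (by decide)
  have n34 := pvNeApp s "SHORT3" "LONG1" (by decide)
  have n35 := pvNeApp s "SHORT3" "LONG2" (by decide)
  have n36 := pvNeApp s "SHORT3" "LONG3" (by decide)
  have n45 := pvNeApp s "LONG1" "LONG2" (by decide)
  have n46 := pvNeApp s "LONG1" "LONG3" (by decide)
  have n56 := pvNeApp s "LONG2" "LONG3" (by decide)
  simp only [pvTags, PySem.Dict.getD_eq_get?_getD, PySem.Dict.get?_mk_cons, beq_iff_eq]
  by_cases e1 : s ++ "SHORT1" = c <;> by_cases e2 : s ++ "SHORT2" = c <;>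
    by_cases e3 : s ++ "SHORT3" = c <;> by_cases e4 : s ++ "LONG1" = c <;>
    by_cases e5 : s ++ "LONG2" = c <;> by_cases e6 : s ++ "LONG3" = c <;>
    simp_all [PySem.Dict.get?, @eq_comm String c]

theorem pvTag36 (s c : String) :
    (PySem.Dict.getD (pvTags s) c 0 &&& 36 != 0)
      = (c == s ++ "SHORT3" || c == s ++ "LONG3") := by
  have n12 := pvNeApp s "SHORT1" "SHORT2" (by decide)
  have n13 := pvNeApp s "SHORT1" "SHORT3" (by decide)
  have n14 := pvNeApp s "SHORT1" "LONG1" (by decide)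
  have n15 := pvNeApp s "SHORT1" "LONG2" (by decide)
  have n16 := pvNeApp s "SHORT1" "LONG3" (by decide)
  have n23 := pvNeApp s "SHORT2" "SHORT3" (by decide)
  have n24 := pvNeApp s "SHORT2" "LONG1" (by decide)
  have n25 := pvNeApp s "SHORT2" "LONG2" (by decide)
  have n26 := pvNeApp s "SHORT2" "LONG3" (by decide)
  have n34 := pvNeApp s "SHORT3" "LONG1" (by decide)
  have n35 := pvNeApp s "SHORT3" "LONG2" (by decide)
  have n36 := pvNeApp s "SHORT3" "LONG3" (by decide)
  have n45 := pvNeApp s "LONG1" "LONG2" (by decide)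
  have n46 := pvNeApp s "LONG1" "LONG3" (by decide)
  have n56 := pvNeApp s "LONG2" "LONG3" (by decide)
  simp only [pvTags, PySem.Dict.getD_eq_get?_getD, PySem.Dict.get?_mk_cons, beq_iff_eq]
  by_cases e1 : s ++ "SHORT1" = c <;> by_cases e2 : s ++ "SHORT2" = c <;>
    by_cases e3 : s ++ "SHORT3" = c <;> by_cases e4 : s ++ "LONG1" = c <;>
    by_cases e5 : s ++ "LONG2" = c <;> by_cases e6 : s ++ "LONG3" = c <;>
    simp_all [PySem.Dict.get?, @eq_comm String c]

theorem pvTag9 (s c : String) :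
    (PySem.Dict.getD (pvTags s) c 0 &&& 9 != 0)
      = (c == s ++ "SHORT1" || c == s ++ "LONG1") := by
  have n12 := pvNeApp s "SHORT1" "SHORT2" (by decide)
  have n13 := pvNeApp s "SHORT1" "SHORT3" (by decide)
  have n14 := pvNeApp s "SHORT1" "LONG1" (by decide)
  have n15 := pvNeApp s "SHORT1" "LONG2" (by decide)
  have n16 := pvNeApp s "SHORT1" "LONG3" (by decide)
  have n23 := pvNeApp s "SHORT2" "SHORT3" (by decide)
  have n24 := pvNeApp s "SHORT2" "LONG1" (by decide)
  have n25 := pvNeApp s "SHORT2" "LONG2" (by decide)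
  have n26 := pvNeApp s "SHORT2" "LONG3" (by decide)
  have n34 := pvNeApp s "SHORT3" "LONG1" (by decide)
  have n35 := pvNeApp s "SHORT3" "LONG2" (by decide)
  have n36 := pvNeApp s "SHORT3" "LONG3" (by decide)
  have n45 := pvNeApp s "LONG1" "LONG2" (by decide)
  have n46 := pvNeApp s "LONG1" "LONG3" (by decide)
  have n56 := pvNeApp s "LONG2" "LONG3" (by decide)
  simp only [pvTags, PySem.Dict.getD_eq_get?_getD, PySem.Dict.get?_mk_cons, beq_iff_eq]
  by_cases e1 : s ++ "SHORT1" = c <;> by_cases e2 : s ++ "SHORT2" = c <;>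
    by_cases e3 : s ++ "SHORT3" = c <;> by_cases e4 : s ++ "LONG1" = c <;>
    by_cases e5 : s ++ "LONG2" = c <;> by_cases e6 : s ++ "LONG3" = c <;>
    simp_all [PySem.Dict.get?, @eq_comm String c]

-- any distributes over ||
theorem pvAnyOr (l : List String) (p q : String → Bool) :
    (l.any fun x => p x || q x) = (l.any p || l.any q) := by
  induction l with
  | nil => rfl
  | cons x xs ih =>
    simp only [List.any_cons, ih]
    by_cases h1 : p x <;> by_cases h2 : q x <;> simp [h1, h2]

-- ===== VERDICT (by name: the statement is the Claim_ definition above) =====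
theorem LEVELDETECT_spec : Claim_equal_LEVELDETECT := by
  intro symbol ticks json _ _
  unfold Spec_LEVELDETECT LEVELDETECT LEVELDETECT_alt
  simp only [pvFlagFold, pvLevelFold, pvMaskFold,
    pvTag7, pvTag56, pvTag36, pvTag9, Bool.false_or, pvAnyOr]
  rcases ticks with _ | ⟨t, rest⟩
  · simp
  · have h0 : ¬ (((t :: rest : List String).length : Int) = 0) := by
      simp only [List.length_cons]; push_cast; omega
    have h1 : (((t :: rest : List String).length : Int) > 0) := by positivity
    rw [if_neg h0, if_pos h1, if_neg (by simp : ¬ (t :: rest : List String) = [])]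
    generalize (t :: rest : List String).any (fun u => pvComment json u == symbol ++ "SHORT1") = s1
    generalize (t :: rest : List String).any (fun u => pvComment json u == symbol ++ "SHORT2") = s2
    generalize (t :: rest : List String).any (fun u => pvComment json u == symbol ++ "SHORT3") = s3
    generalize (t :: rest : List String).any (fun u => pvComment json u == symbol ++ "LONG1") = l1
    generalize (t :: rest : List String).any (fun u => pvComment json u == symbol ++ "LONG2") = l2
    generalize (t :: rest : List String).any (fun u => pvComment json u == symbol ++ "LONG3") = l3
    cases s1 <;> cases s2 <;> cases s3 <;> cases l1 <;> cases l2 <;> cases l3 <;> rfl
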